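-- pv_equiv track=rewrite | github.com/eunseo-kim/Algorithm | programmers/Programmers Challenge/위클리챌린지_7주차.py | solution
-- ===== SOURCE A (Python) =====
-- from collections import defaultdict
--
-- def solution(enter, leave):
--     result = defaultdict(set)
--     for l in leave:
--         i = enter.index(l)
--         meet = enter[: i + 1]
--         for p in meet:
--             result[p].update(set(meet))
--         enter.pop(i)
--
--     answer = []
--     for key in sorted(result.keys()):
--         answer.append(len(result[key]) - 1)
--     return answer
-- ===== SOURCE B (Python) =====
-- def solution(enter, leave):
--     # Rank the departures; a person entering at position i is co-present with a
--     # person at position j > i iff somebody entering at position >= j departs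
--     # no later than both.  Departure ranks per enter position plus a suffix
--     # minimum of those ranks answer that test in O(1) per pair, with no list
--     # mutation.
--     n = len(enter)
--     NEVER = len(leave)      # pseudo-rank for people still inside at the end
--     INF = NEVER + 1         # "no departure at all"
--     pos = {p: i for i, p in enumerate(enter)}
--     rank = [NEVER] * n
--     for t, z in enumerate(leave):
--         rank[pos[z]] = t
--     s = [INF] * (n + 1)
--     for j in range(n - 1, -1, -1):
--         v = rank[j] if rank[j] < NEVER else INF
--         s[j] = min(v, s[j + 1])
--     answer = []
--     for p in sorted(enter):
--         i = pos[p]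
--         if s[i] <= rank[i]:   # a departure happens while p is in the room
--             c = 0
--             for j in range(n):
--                 if j < i and s[i] <= rank[j]:
--                     c += 1
--                 elif j > i and s[j] <= rank[i]:
--                     c += 1
--             answer.append(c)
--     return answer
-- ===== Notes on version B (the rewrite author's own statement) =====
-- stated objective: alternative
-- what changed: Replaces A's per-departure list mutation (index/slice/pop) and per-member set unions with precomputed enter positions, departure ranks per position and a suffix-minimum of those ranks, giving a closed-form co-presence test per pair of enter positions; Pre_ excludes inputs where A raises ValueError (a leave id missing from the still-present entrants) and lists with duplicate ids, on which A's first-index pop accidentally merges distinct visits of the same id.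
-- outside the precondition, e.g. on solution([1, 1], [1, 1]): A returns [0], B returns [1, 1]; on solution([2, 1, 1, 3], [1, 3]): A returns [2, 2, 2], B returns [2, 2, 3, 2]; on solution([1], [1, 1]): A raises ValueError, B returns [0]
import Mathlib
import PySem

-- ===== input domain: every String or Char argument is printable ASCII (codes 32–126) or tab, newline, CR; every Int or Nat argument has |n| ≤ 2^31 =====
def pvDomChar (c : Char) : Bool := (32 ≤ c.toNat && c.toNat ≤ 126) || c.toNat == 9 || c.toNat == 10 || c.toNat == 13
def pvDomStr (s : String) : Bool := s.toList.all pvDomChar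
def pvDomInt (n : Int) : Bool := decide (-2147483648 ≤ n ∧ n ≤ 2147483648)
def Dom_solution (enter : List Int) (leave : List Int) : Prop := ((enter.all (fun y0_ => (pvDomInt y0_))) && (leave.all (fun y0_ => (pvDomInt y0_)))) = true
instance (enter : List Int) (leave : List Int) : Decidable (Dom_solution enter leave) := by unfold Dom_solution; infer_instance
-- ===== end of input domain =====

-- B replaces A's repeated list mutation and set unions by precomputed enter positions,
-- departure ranks and a suffix-minimum of those ranks (a closed-form co-presence test per
-- pair of positions). A mutates its `enter` argument in place (pops every processed
-- element); the equivalence proved here is about the RETURN value only.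


-- ===== PORT A =====
-- result[p].update(set(meet)) for each p in meet
def aUpdate (res : PySem.Dict Int (PySem.Set Int)) (meet : List Int) : PySem.Dict Int (PySem.Set Int) :=
  meet.foldl (fun d p => d.insert p (PySem.Set.update (d.getD p PySem.Set.empty) (PySem.Set.ofList meet))) res

-- the `for l in leave:` loop; `none` = the ValueError of enter.index(l)
def aLoop : List Int → List Int → PySem.Dict Int (PySem.Set Int) → Option (PySem.Dict Int (PySem.Set Int))
  | [], _, res => some res
  | l :: rest, enter, res =>
    match PySem.List.index? enter l with
    | none => none
    | some i =>
      let meet := PySem.List.slice enter none (some ((i : Int) + 1))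
      match PySem.List.pop? enter (i : Int) with
      | none => none
      | some pr => aLoop rest pr.2 (aUpdate res meet)

def solution (enter : List Int) (leave : List Int) : List Int :=
  match aLoop leave enter PySem.Dict.empty with
  | none => []
  | some res =>
    (PySem.List.sorted res.keys (fun x => x) false).foldl
      (fun answer key => answer ++ [PySem.Set.len (res.getD key PySem.Set.empty) - 1]) []

-- ===== PORT B =====
-- {p: i for i, p in enumerate(xs)}
def bIdx (xs : List Int) : PySem.Dict Int Int :=
  (PySem.List.enumerate xs 0).foldl (fun d pr => d.insert pr.2 pr.1) PySem.Dict.empty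

-- the backward loop `for j in range(n-1,-1,-1): v = …; s[j] = min(v, s[j+1])` building the
-- suffix-minimum array s of length n+1 (structural recursion from the right, same cells,
-- same comparisons)
def bSuffMin (L INF : Int) : List Int → List Int
  | [] => [INF]
  | v0 :: t =>
    let r := bSuffMin L INF t
    (min (if v0 < L then v0 else INF) (r.headD INF)) :: r

-- the loop `for t, z in enumerate(leave): rank[pos[z]] = t`; `none` = the KeyError of pos[z]
def bRank : List (Int × Int) → PySem.Dict Int Int → List Int → Option (List Int)
  | [], _, r => some r
  | tz :: rest, pos, r =>
    match pos.get? tz.2 with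
    | none => none
    | some i => bRank rest pos (PySem.List.pySetD r i tz.1)

def solution_alt (enter : List Int) (leave : List Int) : List Int :=
  let n := PySem.List.len enter
  let NEVER := PySem.List.len leave
  let INF := NEVER + 1
  let pos := bIdx enter
  -- `[NEVER] * n` (n = len(enter) ≥ 0)
  match bRank (PySem.List.enumerate leave 0) pos (List.replicate enter.length NEVER) with
  | none => []
  | some rank =>
    let s := bSuffMin NEVER INF rank
    (PySem.List.sorted enter (fun x => x) false).foldl
      (fun answer p =>
        let i := pos.getD p 0
        if PySem.List.pyGetD s i INF ≤ PySem.List.pyGetD rank i NEVER then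
          let c := (PySem.List.pyRange 0 n 1).foldl
            (fun c j =>
              if j < i ∧ PySem.List.pyGetD s i INF ≤ PySem.List.pyGetD rank j NEVER then c + 1
              else if i < j ∧ PySem.List.pyGetD s j INF ≤ PySem.List.pyGetD rank i NEVER then c + 1
              else c) 0
          answer ++ [c]
        else answer) []

-- ===== PRECONDITION & SPEC =====
-- Pre_ excludes (i) inputs where A raises ValueError (some leave element missing from the
-- still-present entrants) and (ii) lists with duplicate ids, a defensible corner on which A's
-- first-index pop merges distinct visits of the same id accidentally.
def Pre_solution (enter : List Int) (leave : List Int) : Prop :=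
  enter.Nodup ∧ leave.Nodup ∧ ∀ x ∈ leave, x ∈ enter
instance (enter : List Int) (leave : List Int) : Decidable (Pre_solution enter leave) := by
  unfold Pre_solution; infer_instance

def pvWitness_solution : List Int × List Int := ([1, 2, 3], [2, 1, 3])

def Spec_solution (enter : List Int) (leave : List Int) (out : List Int) : Prop := out = solution_alt enter leave
instance (enter : List Int) (leave : List Int) (out : List Int) : Decidable (Spec_solution enter leave out) := by unfold Spec_solution; infer_instance

-- ===== CLAIM (what is proved, stated in full; the proofs are below) =====
def Claim_equal_solution : Prop := ∀ (enter : List Int) (leave : List Int), Dom_solution enter leave → Pre_solution enter leave → Spec_solution enter leave (solution enter leave)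

-- ===== LEMMAS AND PROOFS =====

def sMin (L INF : Int) (l : List Int) : Int :=
  l.foldr (fun v acc => min (if v < L then v else INF) acc) INF

theorem sMin_nil (L INF : Int) : sMin L INF [] = INF := rfl
theorem sMin_cons (L INF v : Int) (l : List Int) :
    sMin L INF (v :: l) = min (if v < L then v else INF) (sMin L INF l) := rfl

theorem bSuffMin_headD (L INF : Int) (l : List Int) :
    (bSuffMin L INF l).headD INF = sMin L INF l := by
  induction l with
  | nil => rfl
  | cons v t ih => simp only [bSuffMin, List.headD_cons, ih, sMin_cons]

theorem bSuffMin_getD (L INF : Int) (l : List Int) (j : Nat) :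
    (bSuffMin L INF l).getD j INF = sMin L INF (l.drop j) := by
  induction l generalizing j with
  | nil => cases j <;> simp [bSuffMin, sMin_nil]
  | cons v t ih =>
    cases j with
    | zero =>
      have h := bSuffMin_headD L INF (v :: t)
      simp only [List.drop_zero, ← h]
      cases hb : bSuffMin L INF (v :: t) with
      | nil => simp
      | cons a r => simp
    | succ j => simpa [bSuffMin] using ih j

theorem sMin_le_iff (L INF c : Int) (l : List Int) (hc : c < INF) :
    sMin L INF l ≤ c ↔ ∃ v ∈ l, v < L ∧ v ≤ c := by
  induction l with
  | nil => simp [sMin_nil, not_le.mpr hc]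
  | cons v t ih =>
    rw [sMin_cons, min_le_iff, ih]
    constructor
    · rintro (h | ⟨w, hw, h1, h2⟩)
      · by_cases hv : v < L
        · exact ⟨v, List.mem_cons_self .., hv, by simpa [hv] using h⟩
        · simp [hv] at h; exact absurd h (not_le.mpr hc)
      · exact ⟨w, List.mem_cons_of_mem _ hw, h1, h2⟩
    · rintro ⟨w, hw, h1, h2⟩
      rcases List.mem_cons.mp hw with rfl | hw
      · left; simpa [h1] using h2
      · right; exact ⟨w, hw, h1, h2⟩

theorem bIdx_aux (xs : List Int) (h : xs.Nodup) (p dflt : Int) :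
    ∀ (s : Int) (d : PySem.Dict Int Int),
    ((PySem.List.enumerate xs s).foldl (fun d pr => d.insert pr.2 pr.1) d).getD p dflt
      = if p ∈ xs then s + (xs.idxOf p : Int) else d.getD p dflt := by
  induction xs with
  | nil => intro s d; simp [PySem.List.enumerate_nil]
  | cons x t ih =>
    intro s d
    rw [PySem.List.enumerate_cons, List.foldl_cons]
    rcases List.nodup_cons.mp h with ⟨hx, ht⟩
    rw [ih ht (s+1)]
    by_cases hp : p = x
    · subst hp
      simp [hx, PySem.Dict.getD_insert_self, List.idxOf_cons_self]
    · rw [PySem.Dict.getD_insert_of_ne _ _ _ hp]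
      by_cases hpt : p ∈ t
      · simp only [List.mem_cons, hpt, or_true, if_pos, hp]
        rw [List.idxOf_cons_ne _ (fun h' => hp h'.symm)]
        push_cast; ring
      · simp [hpt, hp]

theorem bIdx_getD (xs : List Int) (h : xs.Nodup) (p dflt : Int) :
    (bIdx xs).getD p dflt = if p ∈ xs then (xs.idxOf p : Int) else dflt := by
  rw [bIdx, bIdx_aux xs h p dflt 0 PySem.Dict.empty]
  simp [PySem.Dict.getD_empty]

def lposN (V : List Int) (x : Int) : Nat := if x ∈ V then List.idxOf x V else V.length
def MeetCond (E V : List Int) (z x : Int) : Prop :=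
  x ∈ E ∧ List.idxOf x E ≤ List.idxOf z E ∧ List.idxOf z V ≤ lposN V x
def Meets (E V P : List Int) (p q : Int) : Prop :=
  ∃ z ∈ P, MeetCond E V z p ∧ MeetCond E V z q

theorem meets_append_singleton (E V P : List Int) (z p q : Int) :
    Meets E V (P ++ [z]) p q ↔ Meets E V P p q ∨ (MeetCond E V z p ∧ MeetCond E V z q) := by
  simp only [Meets, List.mem_append, List.mem_singleton]
  constructor
  · rintro ⟨w, (hw | rfl), h⟩
    · exact Or.inl ⟨w, hw, h⟩
    · exact Or.inr h
  · rintro (⟨w, hw, h⟩ | h)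
    · exact ⟨w, Or.inl hw, h⟩
    · exact ⟨z, Or.inr rfl, h⟩

theorem mem_take_iff_idxOf (l : List Int) (x : Int) (k : Nat) :
    x ∈ l.take k ↔ x ∈ l ∧ List.idxOf x l < k := by
  constructor
  · intro h
    have hx : x ∈ l := List.mem_of_mem_take h
    exact ⟨hx, (List.mem_take_iff_idxOf_lt hx).mp h⟩
  · rintro ⟨hx, hlt⟩
    exact (List.mem_take_iff_idxOf_lt hx).mpr hlt

theorem take_idxOf_filter (E : List Int) (Q : Int → Bool) (z : Int)
    (hz : z ∈ E) (hQz : Q z = true) :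
    (E.filter Q).take (List.idxOf z (E.filter Q) + 1)
      = (E.take (List.idxOf z E + 1)).filter Q := by
  induction E with
  | nil => cases hz
  | cons a t ih =>
    by_cases ha : z = a
    · subst ha
      simp [List.idxOf_cons_self, hQz, List.idxOf_cons_self]
    · have hzt : z ∈ t := by
        rcases List.mem_cons.mp hz with h | h
        · exact absurd h ha
        · exact h
      rw [List.idxOf_cons_ne _ (Ne.symm ha)]
      by_cases hQa : Q a = true
      · rw [List.filter_cons_of_pos hQa]
        rw [List.idxOf_cons_ne _ (Ne.symm ha)]
        simp only [List.take_succ_cons, List.filter_cons_of_pos hQa]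
        rw [ih hzt]
      · rw [List.filter_cons_of_neg (by simpa using hQa)]
        simp only [List.take_succ_cons, List.filter_cons_of_neg (by simpa using hQa)]
        exact ih hzt

theorem eraseIdx_idxOf_filter (E : List Int) (hE : E.Nodup) (Q : Int → Bool) (z : Int)
    (hz : z ∈ E) (hQz : Q z = true) :
    (E.filter Q).eraseIdx (List.idxOf z (E.filter Q)) = E.filter (fun x => Q x && !(x == z)) := by
  induction E with
  | nil => cases hz
  | cons a t ih =>
    rcases List.nodup_cons.mp hE with ⟨haT, htN⟩
    by_cases ha : z = a
    · subst ha
      rw [List.filter_cons_of_pos hQz, List.idxOf_cons_self, List.eraseIdx_cons_zero,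
          List.filter_cons_of_neg (by simp)]
      apply List.filter_congr
      intro x hx
      have hxz : ¬(x == z) = true := by
        simp only [beq_iff_eq]
        rintro rfl; exact haT hx
      simp [hxz]
    · have hzt : z ∈ t := by
        rcases List.mem_cons.mp hz with h | h
        · exact absurd h ha
        · exact h
      have haz : ¬(a == z) = true := by simp [Ne.symm ha]
      by_cases hQa : Q a = true
      · rw [List.filter_cons_of_pos hQa, List.idxOf_cons_ne _ (Ne.symm ha),
            List.eraseIdx_cons_succ, ih htN hzt,
            List.filter_cons_of_pos (by simp [hQa, haz])]
      · rw [List.filter_cons_of_neg (by simpa using hQa),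
            List.filter_cons_of_neg (by simp [hQa])]
        exact ih htN hzt

theorem index?_of_mem (R : List Int) (z : Int) (hz : z ∈ R) :
    PySem.List.index? R z = some (List.idxOf z R) := by
  rw [PySem.List.index?_eq_some_iff]
  have hlt := List.idxOf_lt_length_of_mem hz
  refine ⟨R.take (List.idxOf z R), R.drop (List.idxOf z R + 1), ?_, ?_, ?_⟩
  · conv_lhs => rw [← List.take_append_drop (List.idxOf z R) R]
    rw [List.drop_eq_getElem_cons hlt, List.getElem_idxOf]
  · simp [List.length_take, Nat.le_of_lt hlt]
  · intro hmem
    have := (mem_take_iff_idxOf R z _).mp hmem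
    omega

theorem mem_prefix_iff_idxOf (P rest : List Int) (x : Int) :
    x ∈ P ↔ x ∈ P ++ rest ∧ List.idxOf x (P ++ rest) < P.length := by
  constructor
  · intro h
    refine ⟨List.mem_append_left _ h, ?_⟩
    rw [List.idxOf_append_of_mem h]
    exact List.idxOf_lt_length_of_mem h
  · rintro ⟨hmem, hlt⟩
    by_contra hP
    rw [List.idxOf_append_of_notMem hP] at hlt
    omega

theorem foldl_insert_getD (m : List Int) (hm : m.Nodup) (g : PySem.Set Int → PySem.Set Int) :
    ∀ (res : PySem.Dict Int (PySem.Set Int)) (q : Int),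
    (m.foldl (fun d p => d.insert p (g (d.getD p PySem.Set.empty))) res).getD q PySem.Set.empty
      = if q ∈ m then g (res.getD q PySem.Set.empty) else res.getD q PySem.Set.empty := by
  induction m with
  | nil => intro res q; simp
  | cons p m' ih =>
    intro res q
    rcases List.nodup_cons.mp hm with ⟨hp, hm'⟩
    rw [List.foldl_cons, ih hm']
    by_cases hq : q = p
    · subst hq
      simp [hp, PySem.Dict.getD_insert_self]
    · rw [PySem.Dict.getD_insert_of_ne _ _ _ hq]
      by_cases hq' : q ∈ m' <;> simp [hq', hq]

theorem mem_meet_iff (E V P rest' : List Int) (z x : Int)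
    (hVE : ∀ y ∈ V, y ∈ E) (hsplit : V = P ++ z :: rest') (hzP : z ∉ P) :
    x ∈ (E.take (List.idxOf z E + 1)).filter (fun y => decide (y ∉ P)) ↔ MeetCond E V z x := by
  have hidxzV : List.idxOf z V = P.length := by
    rw [hsplit, List.idxOf_append_of_notMem hzP, List.idxOf_cons_self]
    omega
  have hPlen : P.length ≤ V.length := by rw [hsplit]; simp
  constructor
  · intro h
    rcases List.mem_filter.mp h with ⟨htake, hxP⟩
    have hxP2 : x ∉ P := by simpa using hxP
    rcases (mem_take_iff_idxOf E x _).mp htake with ⟨hxE, hlt⟩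
    refine ⟨hxE, by omega, ?_⟩
    rw [hidxzV]
    by_cases hxV : x ∈ V
    · have hcon : ¬ (x ∈ P ++ z :: rest' ∧ List.idxOf x (P ++ z :: rest') < P.length) :=
        fun hc => hxP2 ((mem_prefix_iff_idxOf _ _ _).mpr hc)
      rw [← hsplit] at hcon
      push Not at hcon
      have hge := hcon hxV
      simp only [lposN, hxV, if_pos]
      omega
    · simp only [lposN, hxV, ite_false]
      omega
  · rintro ⟨hxE, hle, hlp⟩
    rw [hidxzV] at hlp
    refine List.mem_filter.mpr ⟨(mem_take_iff_idxOf E x _).mpr ⟨hxE, by omega⟩, ?_⟩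
    simp only [decide_eq_true_eq]
    intro hxP
    rcases (mem_prefix_iff_idxOf P (z :: rest') x).mp hxP with ⟨hxV, hidx⟩
    rw [← hsplit] at hxV hidx
    simp only [lposN, hxV, if_pos] at hlp
    omega

theorem aLoop_inv (E V : List Int) (hE : E.Nodup) (hV : V.Nodup) (hVE : ∀ x ∈ V, x ∈ E) :
    ∀ (rest P : List Int) (res : PySem.Dict Int (PySem.Set Int)),
    V = P ++ rest →
    res.keys.Nodup →
    (∀ p, p ∈ res.keys ↔ Meets E V P p p) →
    (∀ p, (res.getD p PySem.Set.empty).Nodup) →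
    (∀ p x, x ∈ res.getD p PySem.Set.empty ↔ Meets E V P p x) →
    ∃ resF, aLoop rest (E.filter (fun x => decide (x ∉ P))) res = some resF ∧
      resF.keys.Nodup ∧
      (∀ p, p ∈ resF.keys ↔ Meets E V V p p) ∧
      (∀ p, (resF.getD p PySem.Set.empty).Nodup) ∧
      (∀ p x, x ∈ resF.getD p PySem.Set.empty ↔ Meets E V V p x) := by
  intro rest
  induction rest with
  | nil =>
    intro P res hsplit hkN hkeys hnd hval
    have hPV : P = V := by rw [hsplit]; simp
    subst hPV
    exact ⟨res, rfl, hkN, hkeys, hnd, hval⟩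
  | cons z rest ih =>
    intro P res hsplit hkN hkeys hnd hval
    have hzV : z ∈ V := by rw [hsplit]; simp
    have hzP : z ∉ P := by
      have hd := List.disjoint_of_nodup_append (hsplit ▸ hV)
      intro hc; exact hd hc (by simp)
    have hzE : z ∈ E := hVE z hzV
    have hzR : z ∈ E.filter (fun x => decide (x ∉ P)) :=
      List.mem_filter.mpr ⟨hzE, by simpa using hzP⟩
    set R := E.filter (fun x => decide (x ∉ P)) with hR
    have hRN : R.Nodup := List.Nodup.sublist List.filter_sublist hE
    have hiR : List.idxOf z R < R.length := List.idxOf_lt_length_of_mem hzR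
    have hidx : PySem.List.index? R z = some (List.idxOf z R) := index?_of_mem R z hzR
    have hcast : ((List.idxOf z R : Int) + 1) = ((List.idxOf z R + 1 : Nat) : Int) := by push_cast; ring
    have hslice : PySem.List.slice R none (some ((List.idxOf z R : Int) + 1))
        = (E.take (List.idxOf z E + 1)).filter (fun y => decide (y ∉ P)) := by
      rw [hcast, PySem.List.slice_to_natCast, hR, take_idxOf_filter E _ z hzE (by simpa using hzP)]
    have hpop : PySem.List.pop? R ((List.idxOf z R : Int)) = some (R[List.idxOf z R], R.eraseIdx (List.idxOf z R)) :=
      PySem.List.pop?_natCast R _ hiR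
    have herase : R.eraseIdx (List.idxOf z R) = E.filter (fun x => decide (x ∉ P ++ [z])) := by
      rw [hR, eraseIdx_idxOf_filter E hE _ z hzE (by simpa using hzP)]
      apply List.filter_congr
      intro x _
      by_cases hxP : x ∈ P <;> by_cases hxz : x = z <;>
        simp [hxP, hxz, List.mem_append]
    set meet := (E.take (List.idxOf z E + 1)).filter (fun y => decide (y ∉ P)) with hmeet
    have hmeetN : meet.Nodup :=
      List.Nodup.sublist List.filter_sublist (List.Nodup.sublist (List.take_sublist _ _) hE)
    have hmm : ∀ x, x ∈ meet ↔ MeetCond E V z x := fun x =>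
      mem_meet_iff E V P rest z x hVE hsplit hzP
    -- one step of the loop
    have hstep : aLoop (z :: rest) R res
        = aLoop rest (E.filter (fun x => decide (x ∉ P ++ [z]))) (aUpdate res meet) := by
      rw [aLoop, hidx]
      simp only [hslice, hpop, ← herase]
    -- the updated dict
    have hgetD : ∀ q, (aUpdate res meet).getD q PySem.Set.empty
        = if q ∈ meet then PySem.Set.update (res.getD q PySem.Set.empty) (PySem.Set.ofList meet)
          else res.getD q PySem.Set.empty := by
      intro q
      exact foldl_insert_getD meet hmeetN (fun v => PySem.Set.update v (PySem.Set.ofList meet)) res q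
    have hkeys' : ∀ p, p ∈ (aUpdate res meet).keys ↔ Meets E V (P ++ [z]) p p := by
      intro p
      rw [aUpdate, PySem.Dict.keys_foldl_insert, PySem.Set.mem_update,
          meets_append_singleton, hkeys, ← hmm p, and_self]
    have hkN' : (aUpdate res meet).keys.Nodup := PySem.Dict.nodup_keys_foldl_insert _ _ _ hkN
    have hnd' : ∀ p, ((aUpdate res meet).getD p PySem.Set.empty).Nodup := by
      intro p
      rw [hgetD p]
      split
      · exact PySem.Set.nodup_update _ _ (hnd p)
      · exact hnd p
    have hval' : ∀ p x, x ∈ (aUpdate res meet).getD p PySem.Set.empty ↔ Meets E V (P ++ [z]) p x := by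
      intro p x
      rw [hgetD p, meets_append_singleton, ← hmm p, ← hmm x]
      split
      · rename_i hp
        rw [PySem.Set.mem_update, PySem.Set.mem_ofList, hval p x]
        tauto
      · rename_i hp
        rw [hval p x]
        tauto
    have hsplit' : V = (P ++ [z]) ++ rest := by rw [hsplit]; simp
    rcases ih (P ++ [z]) (aUpdate res meet) hsplit' hkN' hkeys' hnd' hval' with
      ⟨resF, hrun, hc1, hc2, hc3, hc4⟩
    exact ⟨resF, by rw [hstep]; exact hrun, hc1, hc2, hc3, hc4⟩

def MIdx (E V : List Int) (i j : Nat) : Prop :=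
  ∃ m, i ≤ m ∧ j ≤ m ∧ ∃ (hm : m < E.length) (hi : i < E.length) (hj : j < E.length),
    lposN V E[m] < V.length ∧ lposN V E[m] ≤ lposN V E[i] ∧ lposN V E[m] ≤ lposN V E[j]

theorem lposN_le_length (V : List Int) (x : Int) : lposN V x ≤ V.length := by
  unfold lposN
  split
  · exact Nat.le_of_lt (List.idxOf_lt_length_of_mem (by assumption))
  · exact Nat.le_refl _

theorem meets_iff_midx (E V : List Int) (hE : E.Nodup) (hV : V.Nodup)
    (hVE : ∀ x ∈ V, x ∈ E) (p q : Int) (hp : p ∈ E) (hq : q ∈ E) :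
    Meets E V V p q ↔ MIdx E V (List.idxOf p E) (List.idxOf q E) := by
  have hip : List.idxOf p E < E.length := List.idxOf_lt_length_of_mem hp
  have hiq : List.idxOf q E < E.length := List.idxOf_lt_length_of_mem hq
  have hgp : E[List.idxOf p E] = p := List.getElem_idxOf hip
  have hgq : E[List.idxOf q E] = q := List.getElem_idxOf hiq
  constructor
  · rintro ⟨z, hzV, ⟨-, hpz, hzp⟩, ⟨-, hqz, hzq⟩⟩
    have hzE : z ∈ E := hVE z hzV
    have hm : List.idxOf z E < E.length := List.idxOf_lt_length_of_mem hzE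
    have hgz : E[List.idxOf z E] = z := List.getElem_idxOf hm
    have hlz : lposN V z = List.idxOf z V := by simp [lposN, hzV]
    refine ⟨List.idxOf z E, hpz, hqz, hm, hip, hiq, ?_, ?_, ?_⟩
    · rw [hgz, hlz]; exact List.idxOf_lt_length_of_mem hzV
    · rw [hgz, hgp, hlz]; exact hzp
    · rw [hgz, hgq, hlz]; exact hzq
  · rintro ⟨m, him, hjm, hm, hi2, hj2, hltL, hle1, hle2⟩
    have hzV : E[m] ∈ V := by
      by_contra hc
      simp [lposN, hc] at hltL
    have hlz : lposN V E[m] = List.idxOf E[m] V := by simp [lposN, hzV]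
    have hzi : List.idxOf E[m] E = m := List.Nodup.idxOf_getElem hE m hm
    refine ⟨E[m], hzV, ⟨hp, ?_, ?_⟩, ⟨hq, ?_, ?_⟩⟩
    · rw [hzi]; exact him
    · rw [← hlz]; simpa [hgp] using hle1
    · rw [hzi]; exact hjm
    · rw [← hlz]; simpa [hgq] using hle2

theorem sI_le_iff (E V : List Int) (i : Nat) (c : Int) (hc : c ≤ (V.length : Int)) :
    sMin (V.length : Int) ((V.length : Int) + 1) ((E.map (fun p => (lposN V p : Int))).drop i) ≤ c
      ↔ ∃ m, i ≤ m ∧ ∃ hm : m < E.length,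
          (lposN V E[m] : Int) < (V.length : Int) ∧ (lposN V E[m] : Int) ≤ c := by
  rw [sMin_le_iff _ _ _ _ (by omega), ← List.map_drop]
  constructor
  · rintro ⟨v, hv, h1, h2⟩
    rcases List.mem_map.mp hv with ⟨x, hx, rfl⟩
    rcases List.mem_iff_getElem.mp hx with ⟨k, hk, rfl⟩
    have hk' : i + k < E.length := by
      have := hk; simp [List.length_drop] at this; omega
    refine ⟨i + k, by omega, hk', ?_, ?_⟩
    · rw [← List.getElem_drop]; exact h1
    · rw [← List.getElem_drop]; exact h2
  · rintro ⟨m, him, hm, h1, h2⟩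
    refine ⟨(lposN V E[m] : Int), ?_, h1, h2⟩
    apply List.mem_map.mpr
    refine ⟨E[m], ?_, rfl⟩
    apply List.mem_iff_getElem.mpr
    refine ⟨m - i, by simp [List.length_drop]; omega, ?_⟩
    rw [List.getElem_drop]
    congr 1
    omega

theorem midx_symm (E V : List Int) (i j : Nat) : MIdx E V i j ↔ MIdx E V j i := by
  unfold MIdx
  constructor <;> (rintro ⟨m, h1, h2, hm, hi, hj, a, b, c⟩; exact ⟨m, h2, h1, hm, hj, hi, a, c, b⟩)

theorem bpair_iff (E V : List Int) (i j : Nat) (hi : i < E.length) (hj : j < E.length)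
    (hij : i ≤ j) :
    sMin (V.length : Int) ((V.length : Int) + 1) ((E.map (fun p => (lposN V p : Int))).drop j)
        ≤ (lposN V E[i] : Int)
      ↔ MIdx E V i j := by
  rw [sI_le_iff E V j _ (by exact_mod_cast lposN_le_length V E[i])]
  constructor
  · rintro ⟨m, hjm, hm, h1, h2⟩
    have h1' : lposN V E[m] < V.length := by exact_mod_cast h1
    have h2' : lposN V E[m] ≤ lposN V E[i] := by exact_mod_cast h2
    by_cases hcase : lposN V E[m] ≤ lposN V E[j]
    · exact ⟨m, le_trans hij hjm, hjm, hm, hi, hj, h1', h2', hcase⟩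
    · push Not at hcase
      exact ⟨j, hij, le_refl j, hj, hi, hj, by omega, by omega, le_refl _⟩
  · rintro ⟨m, him, hjm, hm, hi2, hj2, h1, h2, h3⟩
    exact ⟨m, hjm, hm, by exact_mod_cast h1, by exact_mod_cast h2⟩

-- counting helpers

theorem countP_eq_countP_range (l : List Int) (P : Int → Bool) (d : Int) :
    l.countP P = (List.range l.length).countP (fun j => P (l.getD j d)) := by
  induction l with
  | nil => simp
  | cons a t ih =>
    rw [List.countP_cons, List.length_cons, List.range_succ_eq_map, List.countP_cons,
        List.countP_map, ih]
    simp [Function.comp_def]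

theorem countP_range_or_eq (n i : Nat) (hi : i < n) (Q : Nat → Bool) (hQ : Q i = false) :
    (List.range n).countP (fun j => Q j || j == i) = (List.range n).countP Q + 1 := by
  induction n with
  | zero => omega
  | succ n ih =>
    rw [List.range_succ, List.countP_append, List.countP_append]
    by_cases hin : i = n
    · subst hin
      have hcongr : (List.range i).countP (fun j => Q j || j == i) = (List.range i).countP Q := by
        apply List.countP_congr
        intro x hx
        have hlt : x < i := List.mem_range.mp hx
        have hxi : (x == i) = false := by simp; omega
        simp [hxi]
      rw [hcongr]
      simp only [List.countP_cons, List.countP_nil, hQ, beq_self_eq_true,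
        if_true, Bool.or_true]
      simp
    · have hi' : i < n := by omega
      rw [ih hi']
      have hne : (n == i) = false := by simp; omega
      simp [hne]
      omega

theorem foldl_two_if_count (l : List Int) (A B : Int → Prop) [DecidablePred A] [DecidablePred B] :
    ∀ a : Int, l.foldl (fun c j => if A j then c + 1 else if B j then c + 1 else c) a
      = a + (l.countP (fun j => decide (A j) || decide (B j)) : Int) := by
  induction l with
  | nil => intro a; simp
  | cons x t ih =>
    intro a
    rw [List.foldl_cons, ih, List.countP_cons]
    by_cases hA : A x <;> by_cases hB : B x <;> simp [hA, hB] <;> push_cast <;> ring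

theorem foldl_append_if_prop (l : List Int) (G : Int → Prop) [DecidablePred G] (f : Int → Int) :
    ∀ acc : List Int,
    l.foldl (fun acc p => if G p then acc ++ [f p] else acc) acc
      = acc ++ (l.filter (fun p => decide (G p))).map f := by
  induction l with
  | nil => intro acc; simp
  | cons x t ih =>
    intro acc
    rw [List.foldl_cons, ih, List.filter_cons]
    by_cases hx : G x <;> simp [hx]

theorem meets_mem_right (E V P : List Int) (p x : Int) (h : Meets E V P p x) : x ∈ E := by
  rcases h with ⟨z, _, _, hcx⟩
  exact hcx.1

theorem guard_iff_meets (E V : List Int) (hE : E.Nodup) (hV : V.Nodup) (hVE : ∀ x ∈ V, x ∈ E)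
    (p : Int) (hp : p ∈ E) :
    (sMin (V.length : Int) ((V.length : Int) + 1)
        ((E.map (fun q => (lposN V q : Int))).drop (List.idxOf p E)) ≤ (lposN V p : Int))
      ↔ Meets E V V p p := by
  have hi : List.idxOf p E < E.length := List.idxOf_lt_length_of_mem hp
  have hg : E[List.idxOf p E] = p := List.getElem_idxOf hi
  rw [meets_iff_midx E V hE hV hVE p p hp hp, ← bpair_iff E V _ _ hi hi (le_refl _), hg]

theorem pair_iff_meets (E V : List Int) (hE : E.Nodup) (hV : V.Nodup) (hVE : ∀ x ∈ V, x ∈ E)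
    (p : Int) (hp : p ∈ E) (j : Nat) (hj : j < E.length) (hne : j ≠ List.idxOf p E) :
    ((((j : Int) < (List.idxOf p E : Int) ∧
        sMin (V.length : Int) ((V.length : Int) + 1)
          ((E.map (fun q => (lposN V q : Int))).drop (List.idxOf p E)) ≤ (lposN V E[j] : Int)) ∨
      ((List.idxOf p E : Int) < (j : Int) ∧
        sMin (V.length : Int) ((V.length : Int) + 1)
          ((E.map (fun q => (lposN V q : Int))).drop j) ≤ (lposN V p : Int))))
      ↔ Meets E V V p E[j] := by
  have hi : List.idxOf p E < E.length := List.idxOf_lt_length_of_mem hp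
  have hg : E[List.idxOf p E] = p := List.getElem_idxOf hi
  have hjE : E[j] ∈ E := List.getElem_mem hj
  have hgj : List.idxOf E[j] E = j := List.Nodup.idxOf_getElem hE j hj
  rw [meets_iff_midx E V hE hV hVE p E[j] hp hjE, hgj]
  rcases Nat.lt_or_ge j (List.idxOf p E) with hlt | hge
  · have h1 : ((j : Int) < (List.idxOf p E : Int)) := by exact_mod_cast hlt
    have h2 : ¬ ((List.idxOf p E : Int) < (j : Int)) := by push Not; exact_mod_cast Nat.le_of_lt hlt
    rw [midx_symm, ← bpair_iff E V j (List.idxOf p E) hj hi (Nat.le_of_lt hlt)]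
    constructor
    · rintro (⟨-, h⟩ | ⟨hc, -⟩)
      · exact h
      · exact absurd hc h2
    · intro h; exact Or.inl ⟨h1, h⟩
  · have hlt' : List.idxOf p E < j := by omega
    have h1 : ((List.idxOf p E : Int) < (j : Int)) := by exact_mod_cast hlt'
    have h2 : ¬ ((j : Int) < (List.idxOf p E : Int)) := by push Not; exact_mod_cast Nat.le_of_lt hlt'
    rw [← bpair_iff E V (List.idxOf p E) j hi hj (Nat.le_of_lt hlt'), hg]
    constructor
    · rintro (⟨hc, -⟩ | ⟨-, h⟩)
      · exact absurd hc h2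
      · exact h
    · intro h; exact Or.inr ⟨h1, h⟩

theorem bIdx_get?_aux (xs : List Int) (h : xs.Nodup) (p : Int) :
    ∀ (s : Int) (d : PySem.Dict Int Int),
    ((PySem.List.enumerate xs s).foldl (fun d pr => d.insert pr.2 pr.1) d).get? p
      = if p ∈ xs then some (s + (xs.idxOf p : Int)) else d.get? p := by
  induction xs with
  | nil => intro s d; simp [PySem.List.enumerate_nil]
  | cons x t ih =>
    intro s d
    rw [PySem.List.enumerate_cons, List.foldl_cons]
    rcases List.nodup_cons.mp h with ⟨hx, ht⟩
    rw [ih ht (s+1)]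
    by_cases hp : p = x
    · subst hp
      simp [hx, PySem.Dict.get?_insert_self, List.idxOf_cons_self]
    · rw [PySem.Dict.get?_insert_of_ne _ _ hp]
      by_cases hpt : p ∈ t
      · simp only [List.mem_cons, hpt, or_true, if_pos, hp]
        rw [List.idxOf_cons_ne _ (fun h' => hp h'.symm)]
        congr 1
        push_cast; ring
      · simp [hpt, hp]

theorem bIdx_get? (xs : List Int) (h : xs.Nodup) (p : Int) :
    (bIdx xs).get? p = if p ∈ xs then some ((xs.idxOf p : Int)) else none := by
  rw [bIdx, bIdx_get?_aux xs h p 0 PySem.Dict.empty]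
  simp [PySem.Dict.get?_empty]

theorem getD_set_lt (r : List Int) (j : Nat) (v : Int) (i : Nat) (hi : i < r.length) :
    (r.set j v).getD i 0 = if i = j then v else r.getD i 0 := by
  have hi' : i < (r.set j v).length := by simpa using hi
  rw [List.getD_eq_getElem _ _ hi', List.getElem_set, List.getD_eq_getElem _ _ hi]
  by_cases h : i = j
  · simp [h]
  · rw [if_neg (fun hh => h hh.symm), if_neg h]

theorem bRank_inv (E : List Int) (hE : E.Nodup) :
    ∀ (rest : List Int) (t : Int) (r : List Int), rest.Nodup → (∀ z ∈ rest, z ∈ E) →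
    r.length = E.length →
    ∃ r', bRank (PySem.List.enumerate rest t) (bIdx E) r = some r' ∧ r'.length = E.length ∧
      ∀ i, i < E.length →
        r'.getD i 0 = if E.getD i 0 ∈ rest then t + (List.idxOf (E.getD i 0) rest : Int)
                      else r.getD i 0 := by
  intro rest
  induction rest with
  | nil =>
    intro t r _ _ hlen
    refine ⟨r, by simp [PySem.List.enumerate_nil, bRank], hlen, ?_⟩
    intro i hi; simp
  | cons z rest ih =>
    intro t r hnd hmem hlen
    rcases List.nodup_cons.mp hnd with ⟨hzrest, hndr⟩
    have hzE : z ∈ E := hmem z (List.mem_cons_self ..)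
    have hget : (bIdx E).get? z = some ((List.idxOf z E : Int)) := by
      rw [bIdx_get? E hE z]; simp [hzE]
    have hidx : List.idxOf z E < E.length := List.idxOf_lt_length_of_mem hzE
    rcases ih (t+1) (r.set (List.idxOf z E) t) hndr
        (fun w hw => hmem w (List.mem_cons_of_mem _ hw)) (by simpa using hlen) with
      ⟨r', hrun, hlen', hchar⟩
    refine ⟨r', ?_, hlen', ?_⟩
    · rw [PySem.List.enumerate_cons]
      simp only [bRank, hget]
      simpa [PySem.List.pySetD_natCast] using hrun
    · intro i hi
      have hir : i < r.length := by omega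
      rw [hchar i hi]
      by_cases hzi : E.getD i 0 = z
      · have hieq : i = List.idxOf z E := by
          have hg : E[i] = z := by rw [← List.getD_eq_getElem E 0 hi]; exact hzi
          rw [← hg, List.Nodup.idxOf_getElem hE i hi]
        have hnr : E.getD i 0 ∉ rest := by rw [hzi]; exact hzrest
        rw [if_neg hnr, if_pos (by rw [hzi]; exact List.mem_cons_self ..),
            getD_set_lt r (List.idxOf z E) t i hir, if_pos hieq, hzi, List.idxOf_cons_self]
        simp
      · have hine : i ≠ List.idxOf z E := by
          intro hc
          apply hzi
          subst hc
          rw [List.getD_eq_getElem E 0 hi]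
          exact List.getElem_idxOf hidx
        by_cases hmemr : E.getD i 0 ∈ rest
        · rw [if_pos hmemr, if_pos (List.mem_cons_of_mem _ hmemr),
              List.idxOf_cons_ne _ (fun h' => hzi h'.symm)]
          push_cast; ring
        · rw [if_neg hmemr, if_neg (by simp only [List.mem_cons, not_or]; exact ⟨hzi, hmemr⟩),
              getD_set_lt r (List.idxOf z E) t i hir, if_neg hine]

theorem bRank_eq (E V : List Int) (hE : E.Nodup) (hV : V.Nodup) (hVE : ∀ x ∈ V, x ∈ E) :
    bRank (PySem.List.enumerate V 0) (bIdx E) (List.replicate E.length ((V.length : Int)))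
      = some (E.map (fun p => ((lposN V p : Nat) : Int))) := by
  rcases bRank_inv E hE V 0 (List.replicate E.length ((V.length : Int))) hV hVE (by simp) with
    ⟨r', hrun, hlen', hchar⟩
  have hr : r' = E.map (fun p => ((lposN V p : Nat) : Int)) := by
    apply List.ext_getElem (by simp [hlen'])
    intro i h1 h2
    have hi : i < E.length := by simpa using h2
    have hc := hchar i hi
    rw [List.getD_eq_getElem _ _ h1] at hc
    rw [hc, List.getElem_map, List.getD_eq_getElem E 0 hi]
    by_cases hm : E[i] ∈ V
    · rw [if_pos hm]
      simp [lposN, hm]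
    · rw [if_neg hm, List.getD_eq_getElem _ _ (by simpa using hi), List.getElem_replicate]
      simp [lposN, hm]
  rw [hr] at hrun
  exact hrun

theorem count_plus_one (n i : Nat) (hi : i < n) (P Q : Nat → Bool)
    (hPi : P i = false) (hQi : Q i = true) (hagree : ∀ j < n, j ≠ i → P j = Q j) :
    (List.range n).countP Q = (List.range n).countP P + 1 := by
  rw [List.countP_congr (q := fun j => P j || (j == i)) ?_]
  · exact countP_range_or_eq n i hi P hPi
  · intro j hj
    have hjn : j < n := List.mem_range.mp hj
    by_cases hji : j = i
    · subst hji; simp [hQi]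
    · simp [hji, (hagree j hjn hji).symm]

theorem count_finish (a b : Nat) (h : a = b + 1) : ((a : Int)) - 1 = ((b : Int)) := by
  subst h; push_cast; ring

-- ===== VERDICT (by name: the statement is the Claim_ definition above) =====
theorem solution_spec : Claim_equal_solution := by
  unfold Claim_equal_solution
  intro E V _hdom hpre
  unfold Spec_solution
  classical
  obtain ⟨hE, hV, hVE⟩ := hpre
  -- run A's loop via the invariant
  obtain ⟨resF, hrun, hkN, hkeys, hnd, hval⟩ :=
    aLoop_inv E V hE hV hVE V [] PySem.Dict.empty (by simp)
      (by simp [PySem.Dict.keys_empty])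
      (by intro p; simp [PySem.Dict.keys_empty, Meets])
      (by intro p; simp [PySem.Dict.getD_empty, PySem.Set.empty])
      (by intro p x; simp [PySem.Dict.getD_empty, PySem.Set.empty, Meets])
  have hfilter : E.filter (fun x => decide (x ∉ ([] : List Int))) = E := by simp
  rw [hfilter] at hrun
  have hA : solution E V = (PySem.List.sorted resF.keys (fun x => x) false).map
      (fun k => PySem.Set.len (resF.getD k PySem.Set.empty) - 1) := by
    unfold solution
    rw [hrun]
    simp only [PySem.List.foldl_append_singleton_eq_map, List.nil_append]
  rw [hA]
  -- normalize B
  simp only [solution_alt]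
  rw [PySem.List.len_eq E, PySem.List.len_eq V]
  simp only [bRank_eq E V hE hV hVE]
  rw [foldl_append_if_prop]
  simp only [List.nil_append]
  -- the guard, in port terms, for members of E
  have hpos : ∀ p ∈ E, (bIdx E).getD p 0 = ((List.idxOf p E : Nat) : Int) := by
    intro p hp
    rw [bIdx_getD E hE p 0]
    simp [hp]
  have hsget : ∀ i : Nat,
      PySem.List.pyGetD (bSuffMin ((V.length : Int)) ((V.length : Int) + 1)
        (E.map (fun q => ((lposN V q : Nat) : Int)))) ((i : Nat) : Int) ((V.length : Int) + 1)
      = sMin ((V.length : Int)) ((V.length : Int) + 1)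
          ((E.map (fun q => ((lposN V q : Nat) : Int))).drop i) := by
    intro i
    rw [PySem.List.pyGetD_natCast, bSuffMin_getD]
  have hlrget : ∀ j : Nat, j < E.length →
      PySem.List.pyGetD (E.map (fun q => ((lposN V q : Nat) : Int))) ((j : Nat) : Int)
        ((V.length : Int)) = ((lposN V (E.getD j 0) : Nat) : Int) := by
    intro j hj
    rw [PySem.List.pyGetD_natCast, List.getD_eq_getElem _ _ (by simpa using hj),
        List.getElem_map, List.getD_eq_getElem _ _ hj]
  have hguard : ∀ p ∈ E,
      (PySem.List.pyGetD (bSuffMin ((V.length : Int)) ((V.length : Int) + 1)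
          (E.map (fun q => ((lposN V q : Nat) : Int)))) ((bIdx E).getD p 0) ((V.length : Int) + 1)
        ≤ PySem.List.pyGetD (E.map (fun q => ((lposN V q : Nat) : Int))) ((bIdx E).getD p 0)
            ((V.length : Int)))
      ↔ Meets E V V p p := by
    intro p hp
    have hip : List.idxOf p E < E.length := List.idxOf_lt_length_of_mem hp
    have hgp : E.getD (List.idxOf p E) 0 = p := by
      rw [List.getD_eq_getElem _ _ hip]; exact List.getElem_idxOf hip
    rw [hpos p hp, hsget, hlrget _ hip, hgp]
    exact guard_iff_meets E V hE hV hVE p hp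
  -- sorted(result.keys) is the guarded subsequence of sorted(enter)
  have hsortnd : (PySem.List.sorted E (fun x => x) false).Nodup :=
    ((PySem.List.sorted_perm E (fun x => x) false).nodup_iff).mpr hE
  have hsortEq : PySem.List.sorted resF.keys (fun x => x) false
      = (PySem.List.sorted E (fun x => x) false).filter (fun p => decide
          (PySem.List.pyGetD (bSuffMin ((V.length : Int)) ((V.length : Int) + 1)
              (E.map (fun q => ((lposN V q : Nat) : Int)))) ((bIdx E).getD p 0)
              ((V.length : Int) + 1)
            ≤ PySem.List.pyGetD (E.map (fun q => ((lposN V q : Nat) : Int)))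
              ((bIdx E).getD p 0) ((V.length : Int)))) := by
    apply PySem.List.sorted_eq_of_perm_of_pairwise_lt
    · apply (List.perm_ext_iff_of_nodup (hsortnd.filter _) hkN).mpr
      intro x
      rw [List.mem_filter, PySem.List.mem_sorted, hkeys x]
      constructor
      · rintro ⟨hxE, hxg⟩
        exact (hguard x hxE).mp (by simpa using hxg)
      · intro hm
        have hxE : x ∈ E := meets_mem_right E V V x x hm
        exact ⟨hxE, by simpa using (hguard x hxE).mpr hm⟩
    · apply List.Pairwise.filter
      have h1 := PySem.List.sorted_pairwise E (fun x => x)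
      have h2 : (PySem.List.sorted E (fun x => x) false).Pairwise (· ≠ ·) := hsortnd
      exact (h1.and h2).imp (fun h => lt_of_le_of_ne h.1 h.2)
  rw [hsortEq]
  apply List.map_congr_left
  intro k hk
  rcases List.mem_filter.mp hk with ⟨hks, hkg⟩
  have hkE : k ∈ E := (PySem.List.mem_sorted _ _ _ _).mp hks
  have hGm : Meets E V V k k := (hguard k hkE).mp (by simpa using hkg)
  have hik : List.idxOf k E < E.length := List.idxOf_lt_length_of_mem hkE
  have hgk : E.getD (List.idxOf k E) 0 = k := by
    rw [List.getD_eq_getElem _ _ hik]; exact List.getElem_idxOf hik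
  -- evaluate the inner counting loop
  rw [hpos k hkE, foldl_two_if_count, PySem.List.pyRange_one]
  simp only [Int.sub_zero, Int.toNat_natCast, List.countP_map, Function.comp_def, zero_add]
  have hlen : (resF.getD k PySem.Set.empty).length
      = E.countP (fun x => decide (Meets E V V k x)) := by
    have hperm : (resF.getD k PySem.Set.empty).Perm
        (E.filter (fun x => decide (Meets E V V k x))) := by
      apply (List.perm_ext_iff_of_nodup (hnd k) (hE.filter _)).mpr
      intro x
      rw [hval k x, List.mem_filter]
      constructor
      · intro h
        exact ⟨meets_mem_right E V V k x h, by simpa using h⟩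
      · rintro ⟨-, h⟩
        simpa using h
    rw [hperm.length_eq, List.countP_eq_length_filter]
  simp only [PySem.Set.len]
  rw [hlen, countP_eq_countP_range E (fun x => decide (Meets E V V k x)) 0]
  refine count_finish _ _ ?_
  apply count_plus_one E.length (List.idxOf k E) hik
  · -- the pair predicate is false at j = i
    simp
  · -- the Meets predicate is true at j = i
    rw [hgk]
    simpa using hGm
  · -- pointwise agreement away from i
    intro j hjn hji
    rw [hsget (List.idxOf k E), hsget j, hlrget j hjn, hlrget (List.idxOf k E) hik, hgk,
        List.getD_eq_getElem _ _ hjn, ← Bool.decide_or]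
    exact (decide_eq_decide).mpr (pair_iff_meets E V hE hV hVE k hkE j hjn hji)
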